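-- pv_equiv track=rewrite | github.com/Tienanh204/Python-Code | Python Code/Baitap/P2-Dequy-Dophuctapthuattoan/Contest4/Bai16-20.py | le
-- ===== SOURCE A (Python) =====
-- def le(n):
--     if n<10:
--         if n%2!=0:
--             return n
--         else:
--             return 0
--     else:
--         if n%2!=0:
--             return n%10 + le(n//10)
--         else:
--             return le(n//10)
-- ===== SOURCE B (Python) =====
-- def le(n):
--     total = 0
--     while n >= 10:
--         if n % 2 != 0:
--             total += n % 10
--         n //= 10
--     if n % 2 != 0:
--         total += n
--     return total
-- ===== Notes on version B (the rewrite author's own statement) =====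
-- stated objective: alternative
-- what changed: Replaces the recursion on n//10 with an iterative while loop threading an accumulator, preserving A's base-case behaviour of adding the whole remaining value (including a negative n) when it is odd.
import Mathlib
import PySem

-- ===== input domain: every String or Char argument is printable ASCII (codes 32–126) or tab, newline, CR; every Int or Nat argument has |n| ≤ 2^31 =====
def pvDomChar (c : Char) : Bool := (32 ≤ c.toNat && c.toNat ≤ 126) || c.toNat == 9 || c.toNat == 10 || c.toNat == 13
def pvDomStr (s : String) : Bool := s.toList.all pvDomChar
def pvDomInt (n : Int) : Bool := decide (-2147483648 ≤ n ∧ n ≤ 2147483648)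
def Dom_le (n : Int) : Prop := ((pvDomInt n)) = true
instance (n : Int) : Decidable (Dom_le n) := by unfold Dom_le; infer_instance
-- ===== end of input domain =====

-- B replaces A's recursion on n//10 by an iterative loop with an accumulator (same per-digit work, flat control).

theorem pv_fdiv10_lt (n : Int) (h : ¬ n < 10) :
    (PySem.Int.floordiv n 10).toNat < n.toNat := by
  rw [PySem.Int.floordiv_eq_ediv_of_pos (by omega)]
  omega

-- ===== PORT A =====
def le (n : Int) : Int :=
  if n < 10 then
    if PySem.Int.mod n 2 ≠ 0 then n else 0
  else
    if PySem.Int.mod n 2 ≠ 0 then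
      PySem.Int.mod n 10 + le (PySem.Int.floordiv n 10)
    else
      le (PySem.Int.floordiv n 10)
termination_by n.toNat
decreasing_by all_goals exact pv_fdiv10_lt n (by assumption)

-- ===== PORT B =====
-- the while loop of Source B: state (n, total)
def leGo (n total : Int) : Int :=
  if 10 ≤ n then
    leGo (PySem.Int.floordiv n 10)
      (if PySem.Int.mod n 2 ≠ 0 then total + PySem.Int.mod n 10 else total)
  else
    if PySem.Int.mod n 2 ≠ 0 then total + n else total
termination_by n.toNat
decreasing_by exact pv_fdiv10_lt n (by omega)

def le_alt (n : Int) : Int := leGo n 0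

-- ===== PRECONDITION & SPEC =====
def Spec_le (n : Int) (out : Int) : Prop := out = le_alt n
instance (n : Int) (out : Int) : Decidable (Spec_le n out) := by unfold Spec_le; infer_instance

-- ===== CLAIM (what is proved, stated in full; the proofs are below) =====
def Claim_equal_le : Prop := ∀ (n : Int), Dom_le n → Spec_le n (le n)

-- ===== LEMMAS AND PROOFS =====
theorem leGo_eq (n total : Int) : leGo n total = total + le n := by
  rw [leGo]
  split_ifs with h hm hm
  · rw [leGo_eq]; conv_rhs => rw [le]
    rw [if_neg (show ¬ n < 10 by omega), if_pos hm]; ring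
  · rw [leGo_eq]; conv_rhs => rw [le]
    rw [if_neg (show ¬ n < 10 by omega), if_neg hm]
  all_goals rw [le, if_pos (by omega)]
  · rw [if_pos hm]
  · rw [if_neg hm]; omega
termination_by n.toNat
decreasing_by all_goals exact pv_fdiv10_lt n (by omega)

-- ===== VERDICT (by name: the statement is the Claim_ definition above) =====
theorem le_spec : Claim_equal_le := by
  intro n _
  unfold Spec_le le_alt
  rw [leGo_eq]
  omega
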